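-- pv_equiv track=rewrite | github.com/06chaynes/descry | src/descry/generate.py | get_leading_docstring
-- ===== SOURCE A (Python) =====
-- def get_leading_docstring(lines, start_idx):
--     doc_lines = []
--     j = start_idx - 1
--     while j >= 0:
--         line = lines[j].strip()
--         # Handle common comment styles: ///, //, /*, *, /**
--         if (
--             line.startswith("///")
--             or line.startswith("//!")
--             or line.startswith("*")
--             or line.startswith("/**")
--             or line.startswith("//")
--         ):
--             # Skip end of block comments if they don't contain content
--             if line == "*/":
--                 j -= 1
--                 continue
--             cleaned = line.lstrip("/!* ").strip()
--             doc_lines.insert(0, cleaned)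
--             j -= 1
--         else:
--             break
--     return "\n".join(doc_lines)
-- ===== SOURCE B (Python) =====
-- def get_leading_docstring(lines, start_idx):
--     # Boundary scan first, then a forward pass over the block (no insert(0)).
--     def is_comment(s):
--         return s.startswith(("///", "//!", "*", "/**", "//"))
--     b = start_idx
--     while b - 1 >= 0 and is_comment(lines[b - 1].strip()):
--         b -= 1
--     parts = []
--     for i in range(b, start_idx):
--         s = lines[i].strip()
--         if s == "*/":
--             continue
--         parts.append(s.lstrip("/!* ").strip())
--     return "\n".join(parts)
-- ===== Notes on version B (the rewrite author's own statement) =====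
-- stated objective: alternative
-- what changed: A interleaves boundary detection and content accumulation in one backward loop that builds the result with insert(0); B first finds the block boundary with a backward index scan and then collects the cleaned lines in a single forward pass, eliminating the insert(0).
import Mathlib
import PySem

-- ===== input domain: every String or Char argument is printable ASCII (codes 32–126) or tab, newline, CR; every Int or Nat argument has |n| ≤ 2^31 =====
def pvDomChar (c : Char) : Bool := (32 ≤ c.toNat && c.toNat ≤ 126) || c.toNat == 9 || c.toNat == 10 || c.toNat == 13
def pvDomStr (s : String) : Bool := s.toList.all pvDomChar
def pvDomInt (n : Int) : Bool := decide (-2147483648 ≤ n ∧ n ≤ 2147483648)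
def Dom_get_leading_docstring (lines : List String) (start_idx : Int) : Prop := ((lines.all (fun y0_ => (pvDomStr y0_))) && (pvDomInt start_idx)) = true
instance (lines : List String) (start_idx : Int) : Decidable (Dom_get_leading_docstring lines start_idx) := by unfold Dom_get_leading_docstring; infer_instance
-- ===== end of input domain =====

-- B replaces A's single backward loop with insert(0) by a boundary scan followed by a
-- forward collection pass (same cost; a different decomposition).

-- ===== PORT A =====
-- cleaned = line.lstrip("/!* ").strip()  (shared verbatim by both Pythons)
def pvClean (s : List Char) : List Char :=
  PySem.Chars.strip (s.dropWhile (fun c => c ∈ ['/', '!', '*', ' ']))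

-- the while j >= 0 loop; fuel k = j + 1 (index accessed is k - 1); out-of-range reads
-- (excluded by Pre_) are rendered as getD ""
def pvALoop (lines : List String) : Nat → List (List Char) → List (List Char)
  | 0, doc => doc
  | (k+1), doc =>
      let line := PySem.Chars.strip ((PySem.List.pyGet? lines (k : Int)).getD "").toList
      if (PySem.Chars.startswith line "///".toList || PySem.Chars.startswith line "//!".toList ||
          PySem.Chars.startswith line "*".toList || PySem.Chars.startswith line "/**".toList ||
          PySem.Chars.startswith line "//".toList) then
        if line = "*/".toList then pvALoop lines k doc
        else pvALoop lines k (pvClean line :: doc)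
      else doc

def get_leading_docstring (lines : List String) (start_idx : Int) : String :=
  String.ofList (PySem.Chars.join "\n".toList (pvALoop lines start_idx.toNat []))

-- ===== PORT B =====
def pvIsComment (line : List Char) : Bool :=
  PySem.Chars.startswith line "///".toList || PySem.Chars.startswith line "//!".toList ||
  PySem.Chars.startswith line "*".toList || PySem.Chars.startswith line "/**".toList ||
  PySem.Chars.startswith line "//".toList

-- backward boundary scan: while b - 1 >= 0 and is_comment(lines[b-1].strip()): b -= 1
def pvBoundary (lines : List String) : Nat → Nat
  | 0 => 0
  | (b+1) =>
      if pvIsComment (PySem.Chars.strip ((PySem.List.pyGet? lines (b : Int)).getD "").toList) then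
        pvBoundary lines b
      else b+1

-- body of the forward for-loop over range(b, start_idx)
def pvStep (lines : List String) (acc : List (List Char)) (i : Int) : List (List Char) :=
  let s := PySem.Chars.strip ((PySem.List.pyGet? lines i).getD "").toList
  if s = "*/".toList then acc else acc ++ [pvClean s]

def get_leading_docstring_alt (lines : List String) (start_idx : Int) : String :=
  let b := pvBoundary lines start_idx.toNat
  String.ofList (PySem.Chars.join "\n".toList
    ((PySem.List.pyRange (b : Int) start_idx 1).foldl (pvStep lines) []))

-- ===== PRECONDITION & SPEC =====
-- A raises IndexError when start_idx - 1 is past the end of lines (first read out of range)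
def Pre_get_leading_docstring (lines : List String) (start_idx : Int) : Prop :=
  start_idx ≤ (lines.length : Int)
instance (lines : List String) (start_idx : Int) : Decidable (Pre_get_leading_docstring lines start_idx) := by unfold Pre_get_leading_docstring; infer_instance

def pvWitness_get_leading_docstring : List String × Int := (["/// hi"], 1)

def Spec_get_leading_docstring (lines : List String) (start_idx : Int) (out : String) : Prop := out = get_leading_docstring_alt lines start_idx
instance (lines : List String) (start_idx : Int) (out : String) : Decidable (Spec_get_leading_docstring lines start_idx out) := by unfold Spec_get_leading_docstring; infer_instance

-- ===== CLAIM (what is proved, stated in full; the proofs are below) =====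
def Claim_equal_get_leading_docstring : Prop := ∀ (lines : List String) (start_idx : Int), Dom_get_leading_docstring lines start_idx → Pre_get_leading_docstring lines start_idx → Spec_get_leading_docstring lines start_idx (get_leading_docstring lines start_idx)

-- ===== LEMMAS AND PROOFS =====

lemma pvBoundary_le (lines : List String) (k : Nat) : pvBoundary lines k ≤ k := by
  induction k with
  | zero => simp [pvBoundary]
  | succ b ih =>
      simp only [pvBoundary]
      split
      · omega
      · omega

lemma pvMain (lines : List String) (k : Nat) (doc : List (List Char)) :
    pvALoop lines k doc =
      (PySem.List.pyRange ((pvBoundary lines k : Nat) : Int) (k : Int) 1).foldl (pvStep lines) [] ++ doc := by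
  induction k generalizing doc with
  | zero =>
      simp [pvALoop, pvBoundary, PySem.List.pyRange_one_eq_nil]
  | succ k ih =>
      simp only [pvALoop, pvBoundary]
      by_cases h : pvIsComment (PySem.Chars.strip ((PySem.List.pyGet? lines (k : Int)).getD "").toList) = true
      · have hb : ((pvBoundary lines k : Nat) : Int) ≤ (k : Int) := by
          exact_mod_cast pvBoundary_le lines k
        have hsplit : PySem.List.pyRange ((pvBoundary lines k : Nat) : Int) ((k : Nat) + 1 : Int) 1
            = PySem.List.pyRange ((pvBoundary lines k : Nat) : Int) (k : Int) 1 ++ [(k : Int)] :=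
          PySem.List.pyRange_one_succ_right hb
        have hcond := h
        simp only [pvIsComment] at hcond
        simp only [hcond, h, if_true]
        push_cast
        rw [hsplit]
        rw [List.foldl_append]
        simp only [List.foldl_cons, List.foldl_nil, pvStep]
        simp only [show ("*/".toList : List Char) = ['*', '/'] from by decide]
        by_cases he : PySem.Chars.strip ((PySem.List.pyGet? lines (k : Int)).getD "").toList = ['*', '/']
        · rw [if_pos he, if_pos he, ih doc]
        · rw [if_neg he, if_neg he, ih (pvClean (PySem.Chars.strip ((PySem.List.pyGet? lines (k : Int)).getD "").toList) :: doc)]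
          simp
      · have hcond := h
        simp only [pvIsComment] at hcond
        simp only [hcond, h]
        push_cast
        rw [PySem.List.pyRange_one_eq_nil (by omega)]
        simp

-- ===== VERDICT (by name: the statement is the Claim_ definition above) =====
theorem get_leading_docstring_spec : Claim_equal_get_leading_docstring := by
  intro lines start_idx _hDom _hPre
  unfold Spec_get_leading_docstring get_leading_docstring get_leading_docstring_alt
  rw [pvMain lines start_idx.toNat []]
  by_cases hpos : 0 ≤ start_idx
  · rw [Int.toNat_of_nonneg hpos]
    simp
  · have h0 : start_idx.toNat = 0 := Int.toNat_of_nonpos (by omega)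
    rw [h0]
    simp only [pvBoundary, Nat.cast_zero]
    rw [PySem.List.pyRange_one_eq_nil (by omega), PySem.List.pyRange_one_eq_nil (by omega)]
    simp
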